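-- pv_equiv track=rewrite | github.com/ddobokki/coding-test-practice | leet_code/leet_36.py | check_diagonal
-- ===== SOURCE A (Python) =====
-- from typing import List
--
-- def check_diagonal(board: List[List[str]]):
--
--     for i in range(len(board)):
--         temp = []
--         for j in range(len(board[i])):
--             n = board[i][j]
--             if n.isdigit():
--                 temp.append(n)
--         if len(temp) != len(set(temp)):
--             return False
--     return True
-- ===== SOURCE B (Python) =====
-- def check_diagonal(board):
--     for row in board:
--         digits = sorted(n for n in row if n.isdigit())
--         if any(a == b for a, b in zip(digits, digits[1:])):
--             return False
--     return True
-- ===== Notes on version B (the rewrite author's own statement) =====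
-- stated objective: alternative
-- what changed: Replaces A's per-row 'collect digit list, then compare len(list) to len(set(list))' with sort-then-scan: sort the row's digit strings and report a duplicate iff some adjacent pair of the sorted list is equal.
import Mathlib
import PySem

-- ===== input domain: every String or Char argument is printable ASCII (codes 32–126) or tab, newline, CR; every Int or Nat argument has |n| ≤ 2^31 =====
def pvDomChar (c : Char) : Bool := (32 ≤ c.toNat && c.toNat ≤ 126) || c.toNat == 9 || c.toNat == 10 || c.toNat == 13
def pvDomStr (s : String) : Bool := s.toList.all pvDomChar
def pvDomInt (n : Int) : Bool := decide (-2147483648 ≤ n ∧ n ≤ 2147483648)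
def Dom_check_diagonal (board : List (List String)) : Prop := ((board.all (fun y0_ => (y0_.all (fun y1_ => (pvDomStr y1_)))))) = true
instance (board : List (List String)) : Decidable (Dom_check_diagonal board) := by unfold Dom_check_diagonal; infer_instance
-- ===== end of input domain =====

-- B replaces A's per-row "collect digit list, compare len(list) to len(set(list))" with
-- sort-then-scan: sort the row's digit strings and look for an equal adjacent pair
-- (alternative algorithm; same results, different cost profile).


-- ===== PORT A =====
-- for each row: temp = [n for n in row if n.isdigit()]; if len(temp) != len(set(temp)): return False
def check_diagonal (board : List (List String)) : Bool :=
  match board with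
  | [] => true
  | row :: rest =>
    let temp := row.foldl (fun t n => if PySem.Str.strIsdigit n then t ++ [n] else t) []
    if temp.length ≠ (PySem.Set.ofList temp).length then false
    else check_diagonal rest

-- ===== PORT B =====
-- for each row: digits = sorted(n for n in row if n.isdigit());
--               if any(a == b for a, b in zip(digits, digits[1:])): return False
def check_diagonal_alt (board : List (List String)) : Bool :=
  match board with
  | [] => true
  | row :: rest =>
    let digits := PySem.List.sorted (row.filter PySem.Str.strIsdigit) (fun x => x) false
    if (digits.zip digits.tail).any (fun p => p.1 == p.2) then false
    else check_diagonal_alt rest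

-- ===== PRECONDITION & SPEC =====
def Spec_check_diagonal (board : List (List String)) (out : Bool) : Prop := out = check_diagonal_alt board
instance (board : List (List String)) (out : Bool) : Decidable (Spec_check_diagonal board out) := by unfold Spec_check_diagonal; infer_instance

-- ===== CLAIM (what is proved, stated in full; the proofs are below) =====
def Claim_equal_check_diagonal : Prop := ∀ (board : List (List String)), Dom_check_diagonal board → Spec_check_diagonal board (check_diagonal board)

-- ===== LEMMAS AND PROOFS =====

-- set(xs) is a sublist of xs (first occurrences kept in order)
theorem pvOfList_sublist (xs : List String) : (PySem.Set.ofList xs).Sublist xs := by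
  induction xs with
  | nil => simp [PySem.Set.ofList_nil]
  | cons x xs ih =>
    rw [PySem.Set.ofList_cons]
    exact List.Sublist.cons₂ x (List.Sublist.trans List.filter_sublist ih)

-- A's length comparison decides Nodup
theorem pvLen_eq_iff (xs : List String) :
    (xs.length = (PySem.Set.ofList xs).length) ↔ xs.Nodup := by
  constructor
  · intro h
    have := (pvOfList_sublist xs).eq_of_length h.symm
    rw [← this]
    exact PySem.Set.nodup_ofList xs
  · intro h
    rw [PySem.Set.ofList_eq_self_of_nodup xs h]

-- on a ≤-sorted list, "no equal adjacent pair" decides Nodup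
theorem pvAdj_iff (l : List String) (hs : l.Pairwise (· ≤ ·)) :
    ((l.zip l.tail).any (fun p => p.1 == p.2)) = false ↔ l.Nodup := by
  induction l with
  | nil => simp
  | cons a t ih =>
    match t with
    | [] => simp
    | b :: t' =>
      rcases List.pairwise_cons.mp hs with ⟨ha, ht⟩
      by_cases hab : a = b
      · subst hab
        simp
      · have hlt : a < b := lt_of_le_of_ne (ha b (by simp)) hab
        have hstep : ((a :: b :: t').zip (a :: b :: t').tail).any (fun p => p.1 == p.2)
            = (((b :: t').zip (b :: t').tail).any (fun p => p.1 == p.2)) := by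
          simp [hab]
        rw [hstep, ih ht]
        constructor
        · intro hnd
          refine List.nodup_cons.mpr ⟨?_, hnd⟩
          intro hmem
          rcases List.mem_cons.mp hmem with h1 | h1
          · exact hab h1
          · rcases List.pairwise_cons.mp ht with ⟨hb, _⟩
            exact absurd rfl (ne_of_lt (lt_of_lt_of_le hlt (hb a h1))).elim
        · intro hnd
          exact (List.nodup_cons.mp hnd).2

-- main equality (both ports are total; Dom is not needed)
theorem pvMain (board : List (List String)) :
    check_diagonal board = check_diagonal_alt board := by
  induction board with
  | nil => rfl
  | cons row rest ih =>
    rw [check_diagonal, check_diagonal_alt]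
    have htemp : row.foldl (fun t n => if PySem.Str.strIsdigit n then t ++ [n] else t) []
        = row.filter PySem.Str.strIsdigit := by
      have := PySem.List.foldl_append_if PySem.Str.strIsdigit (fun n => n) row []
      simpa using this
    set ds := PySem.List.sorted (row.filter PySem.Str.strIsdigit) (fun x => x) false with hds
    have hperm : ds.Perm (row.filter PySem.Str.strIsdigit) := PySem.List.sorted_perm _ _ _
    have hpw : ds.Pairwise (· ≤ ·) := by
      simpa using PySem.List.sorted_pairwise (row.filter PySem.Str.strIsdigit) (fun x => x)
    rw [htemp]
    by_cases hnd : (row.filter PySem.Str.strIsdigit).Nodup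
    · rw [if_neg (by simp [(pvLen_eq_iff _).mpr hnd]),
          if_neg (by rw [Bool.not_eq_true, pvAdj_iff ds hpw]; exact hperm.nodup_iff.mpr hnd), ih]
    · rw [if_pos (by intro h; exact hnd ((pvLen_eq_iff _).mp h)),
          if_pos ?_]
      rcases Bool.eq_false_or_eq_true (((ds.zip ds.tail).any (fun p => p.1 == p.2))) with h | h
      · exact h
      · exact absurd (hperm.nodup_iff.mp ((pvAdj_iff ds hpw).mp h)) hnd

-- ===== VERDICT (by name: the statement is the Claim_ definition above) =====
theorem check_diagonal_spec : Claim_equal_check_diagonal := by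
  intro board _
  exact pvMain board
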